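-- pv_equiv track=rewrite | github.com/smullins7/advent-of-code | 2021/day_17.py | determine_steps
-- ===== SOURCE A (Python) =====
-- def determine_steps(target_x_min, target_x_max):
--     possible = []
--
--     for x in range(1, target_x_max + 1):
--         steps = 0
--         position = 0
--         velocity = x
--
--         while position < target_x_max and velocity > 0:
--             position += velocity
--             steps += 1
--             velocity -= 1
--             if target_x_min <= position <= target_x_max:
--                 possible.append((steps, x))
--         if velocity == 0:
--             # feeling lazy today, oh well
--             for buffer_step in range(steps + 1, steps + 150):
--                 possible.append((buffer_step, x))
--     return possible
-- ===== SOURCE B (Python) =====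
-- def determine_steps(target_x_min, target_x_max):
--     # Closed form: after k steps (k <= x) with initial x-velocity x, the doubled position is
--     # 2*pos(k) = k*(2*x + 1 - k), strictly increasing in k on [0, x] and increasing in x.
--     # So the steps landing in the target form a contiguous block [k_lo, k_hi], and both
--     # endpoints are non-increasing as x grows (once past their switch-on points): maintain
--     # them as two amortized pointers instead of re-simulating every step.
--     lo2 = 2 * target_x_min
--     hi2 = 2 * target_x_max
--     result = []
--     k_hi = 0
--     k_lo = 0  # 0 = not yet activated (peak still below target_x_min)
--     for x in range(1, target_x_max + 1):
--         w = 2 * x + 1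
--         peak2 = x * (x + 1)  # doubled maximum position, reached at step x
--         if peak2 <= hi2:
--             k_hi = x
--         else:
--             while k_hi * (w - k_hi) > hi2:
--                 k_hi -= 1
--         if lo2 <= peak2:
--             if k_lo == 0:
--                 k_lo = x
--             while k_lo > 1 and lo2 <= (k_lo - 1) * (w - (k_lo - 1)):
--                 k_lo -= 1
--             result += [(k, x) for k in range(k_lo, k_hi + 1)]
--         if peak2 <= hi2:
--             # the probe stalls at distance peak for ever: the original's 149-step buffer
--             result += [(k, x) for k in range(x + 1, x + 150)]
--     return result
-- ===== Notes on version B (the rewrite author's own statement) =====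
-- stated objective: alternative
-- what changed: Replaces A's per-x step-by-step velocity simulation with the closed-form doubled position 2*pos(k)=k*(2x+1-k) and two amortized pointers (k_lo, k_hi) that track the contiguous block of landing steps as x grows, emitting each block at once.
import Mathlib
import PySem

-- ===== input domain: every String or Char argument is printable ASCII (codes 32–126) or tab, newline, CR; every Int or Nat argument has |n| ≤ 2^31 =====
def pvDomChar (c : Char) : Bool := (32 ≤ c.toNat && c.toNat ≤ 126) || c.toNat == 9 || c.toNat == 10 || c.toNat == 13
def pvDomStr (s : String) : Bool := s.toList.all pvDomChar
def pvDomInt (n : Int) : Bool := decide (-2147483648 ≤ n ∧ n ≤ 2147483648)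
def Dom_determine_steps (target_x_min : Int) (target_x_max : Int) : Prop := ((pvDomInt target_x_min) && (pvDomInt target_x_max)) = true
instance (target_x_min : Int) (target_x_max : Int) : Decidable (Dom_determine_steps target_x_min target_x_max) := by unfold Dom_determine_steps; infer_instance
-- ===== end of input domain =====

-- B replaces A's per-x step-by-step velocity simulation with the closed-form doubled
-- position 2*pos(k) = k*(2x+1-k) and two amortized pointers (k_lo, k_hi) for the
-- contiguous block of landing steps (objective: alternative algorithm; same return value).

-- ===== PORT A =====
-- the inner `while position < target_x_max and velocity > 0` loop of A
def aLoop (tmin tmax x steps position velocity : Int) (acc : List (Int × Int)) :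
    Int × Int × List (Int × Int) :=
  if position < tmax ∧ 0 < velocity then
    let p := position + velocity
    let s := steps + 1
    let v := velocity - 1
    aLoop tmin tmax x s p v (if tmin ≤ p ∧ p ≤ tmax then acc ++ [(s, x)] else acc)
  else (steps, velocity, acc)
termination_by velocity.toNat
decreasing_by omega

def determine_steps (target_x_min : Int) (target_x_max : Int) : List (Int × Int) :=
  (PySem.List.pyRange 1 (target_x_max + 1) 1).foldl (fun possible x =>
    let r := aLoop target_x_min target_x_max x 0 0 x possible
    if r.2.1 == 0 then
      r.2.2 ++ (PySem.List.pyRange (r.1 + 1) (r.1 + 150) 1).map (fun b => (b, x))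
    else r.2.2) []

-- ===== PORT B =====
-- Source B's `while k_hi * (w - k_hi) > hi2: k_hi -= 1`
def whileHi (hi2 w k : Int) : Int :=
  if k * (w - k) > hi2 then whileHi hi2 w (k - 1) else k
termination_by (k + (w.natAbs + hi2.natAbs + 1)).toNat
decreasing_by
  rename_i h
  have hk : -((w.natAbs : Int) + (hi2.natAbs : Int)) ≤ k := by
    by_contra hc
    have h1 : 0 < w - k := by omega
    have h2 : k ≤ -1 := by omega
    have h3 : k * (w - k) ≤ (-1) * (w - k) := mul_le_mul_of_nonneg_right h2 (le_of_lt h1)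
    have h4 : ((hi2.natAbs : Int) + 1) ≤ w - k := by omega
    have h5 : -((hi2.natAbs : Int)) ≤ hi2 := by omega
    linarith
  omega

-- Source B's `while k_lo > 1 and lo2 <= (k_lo - 1) * (w - (k_lo - 1)): k_lo -= 1`
def whileLo (lo2 w k : Int) : Int :=
  if 1 < k ∧ lo2 ≤ (k - 1) * (w - (k - 1)) then whileLo lo2 w (k - 1) else k
termination_by (k - 1).toNat
decreasing_by omega

def determine_steps_alt (target_x_min : Int) (target_x_max : Int) : List (Int × Int) :=
  let lo2 := 2 * target_x_min
  let hi2 := 2 * target_x_max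
  ((PySem.List.pyRange 1 (target_x_max + 1) 1).foldl
    (fun (st : List (Int × Int) × Int × Int) x =>
      let w := 2 * x + 1
      let peak2 := x * (x + 1)
      let k_hi := if peak2 ≤ hi2 then x else whileHi hi2 w st.2.1
      let st1 : List (Int × Int) × Int × Int :=
        if lo2 ≤ peak2 then
          let k_lo := whileLo lo2 w (if st.2.2 == 0 then x else st.2.2)
          (st.1 ++ (PySem.List.pyRange k_lo (k_hi + 1) 1).map (fun k => (k, x)), k_hi, k_lo)
        else (st.1, k_hi, st.2.2)
      if peak2 ≤ hi2 then
        (st1.1 ++ (PySem.List.pyRange (x + 1) (x + 150) 1).map (fun k => (k, x)), st1.2)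
      else st1)
    ([], 0, 0)).1

-- ===== PRECONDITION & SPEC =====
def Spec_determine_steps (target_x_min : Int) (target_x_max : Int) (out : List (Int × Int)) : Prop := out = determine_steps_alt target_x_min target_x_max
instance (target_x_min : Int) (target_x_max : Int) (out : List (Int × Int)) : Decidable (Spec_determine_steps target_x_min target_x_max out) := by unfold Spec_determine_steps; infer_instance

-- ===== CLAIM (what is proved, stated in full; the proofs are below) =====
def Claim_equal_determine_steps : Prop := ∀ (target_x_min : Int) (target_x_max : Int), Dom_determine_steps target_x_min target_x_max → Spec_determine_steps target_x_min target_x_max (determine_steps target_x_min target_x_max)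

-- ===== LEMMAS AND PROOFS =====

-- posB x k = the probe's position after k steps with initial velocity x (proof-side)
def posB (x k : Int) : Int := PySem.Int.floordiv (k * (2 * x - k + 1)) 2

-- proof-side reference values: largest k in [lo,hi] with posB ≤ tmax, smallest with tmin ≤ posB
def bHi (tmax x lo hi : Int) : Int :=
  if h : lo < hi then
    let mid := PySem.Int.floordiv (lo + hi + 1) 2
    if posB x mid ≤ tmax then bHi tmax x mid hi else bHi tmax x lo (mid - 1)
  else lo
termination_by (hi - lo).toNat
decreasing_by
  all_goals
    have hb := PySem.Int.floordiv_two_mid_bounds (lo := lo + 1) (hi := hi) (by omega)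
    have e : lo + 1 + hi = lo + hi + 1 := by ring
    rw [e] at hb
    omega

def bLo (tmin x lo hi : Int) : Int :=
  if h : lo < hi then
    let mid := PySem.Int.floordiv (lo + hi) 2
    if tmin ≤ posB x mid then bLo tmin x lo mid else bLo tmin x (mid + 1) hi
  else lo
termination_by (hi - lo).toNat
decreasing_by
  all_goals
    have hb := PySem.Int.floordiv_two_mid_bounds (lo := lo) (hi := hi) (le_of_lt h)
    have hlt : PySem.Int.floordiv (lo + hi) 2 < hi :=
      (PySem.Int.floordiv_lt_iff_lt_mul (by omega)).2 (by omega)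
    omega

theorem fdiv2_exact (m : Int) : PySem.Int.floordiv (2 * m) 2 = m := by
  rw [PySem.Int.floordiv_eq_iff_of_pos (by omega)]
  omega

theorem posB_double (x k : Int) : 2 * posB x k = k * (2 * x - k + 1) := by
  obtain ⟨m, hm⟩ : ∃ m, k * (2 * x - k + 1) = 2 * m := by
    rcases Int.even_or_odd k with ⟨t, ht⟩ | ⟨t, ht⟩
    · exact ⟨t * (2 * x - k + 1), by rw [ht]; ring⟩
    · exact ⟨k * (x - t), by rw [ht]; ring⟩
  unfold posB
  rw [hm, fdiv2_exact]

theorem posB_zero (x : Int) : posB x 0 = 0 := by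
  have := posB_double x 0
  omega

theorem posB_succ (x k : Int) : posB x (k + 1) = posB x k + (x - k) := by
  have h1 := posB_double x k
  have h2 : 2 * posB x (k + 1) = k * (2 * x - k + 1) + 2 * (x - k) := by
    rw [posB_double]; ring
  linarith

-- moving from initial velocity x-1 to x raises every position (k ≥ 0) by exactly k
theorem posB_xstep (x k : Int) : posB x k = posB (x - 1) k + k := by
  have h1 := posB_double x k
  have h2 : 2 * posB (x - 1) k = k * (2 * x - k + 1) - 2 * k := by
    rw [posB_double]; ring
  linarith

theorem posB_add (x a : Int) (n : Nat) (h : a + n ≤ x) :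
    posB x a + n ≤ posB x (a + n) := by
  induction n with
  | zero => simp
  | succ m ih =>
    have hs : posB x (a + m + 1) = posB x (a + m) + (x - (a + m)) := posB_succ x (a + m)
    have hm : a + (m : Int) ≤ x := by push_cast at h ⊢; linarith
    have := ih hm
    push_cast at h ⊢
    have e : a + ((m : Int) + 1) = a + m + 1 := by ring
    rw [e, hs]
    linarith

theorem posB_mono (x a b : Int) (hab : a ≤ b) (hbx : b ≤ x) :
    posB x a + (b - a) ≤ posB x b := by
  obtain ⟨n, hn⟩ : ∃ n : Nat, b = a + n := ⟨(b - a).toNat, by omega⟩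
  subst hn
  have := posB_add x a n (by omega)
  push_cast at this
  linarith

theorem posB_le (x a b : Int) (hab : a ≤ b) (hbx : b ≤ x) : posB x a ≤ posB x b := by
  have := posB_mono x a b hab hbx
  linarith

theorem posB_lt (x a b : Int) (hab : a < b) (hbx : b ≤ x) : posB x a < posB x b := by
  have := posB_mono x a b (le_of_lt hab) hbx
  linarith

theorem filter_nil (P : Int → Bool) (a b : Int) (h : ∀ k, a ≤ k → k < b → P k = false) :
    (PySem.List.pyRange a b 1).filter P = [] := by
  rw [List.filter_eq_nil_iff]
  intro k hk
  rw [PySem.List.mem_pyRange_one] at hk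
  simp [h k hk.1 hk.2]

theorem bHi_spec (tmax x : Int) : ∀ n : Nat, ∀ lo hi : Int, (hi - lo).toNat = n →
    lo ≤ hi → hi ≤ x → posB x lo ≤ tmax →
    lo ≤ bHi tmax x lo hi ∧ bHi tmax x lo hi ≤ hi ∧ posB x (bHi tmax x lo hi) ≤ tmax ∧
      (∀ k, bHi tmax x lo hi < k → k ≤ hi → tmax < posB x k) := by
  intro n
  induction n using Nat.strong_induction_on with
  | _ n ih =>
    intro lo hi hn hlh hhx hbase
    rw [bHi]
    by_cases h : lo < hi
    · have hb := PySem.Int.floordiv_two_mid_bounds (lo := lo + 1) (hi := hi) (by omega)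
      have e : lo + 1 + hi = lo + hi + 1 := by ring
      rw [e] at hb
      simp only [h, dif_pos]
      set mid := PySem.Int.floordiv (lo + hi + 1) 2 with hmid
      by_cases hc : posB x mid ≤ tmax
      · simp only [hc, if_pos]
        have := ih (hi - mid).toNat (by omega) mid hi rfl (by omega) hhx hc
        exact ⟨by omega, this.2.1, this.2.2.1, this.2.2.2⟩
      · simp only [hc, if_neg, not_false_iff]
        have := ih (mid - 1 - lo).toNat (by omega) lo (mid - 1) rfl (by omega) (by omega) hbase
        refine ⟨this.1, by omega, this.2.2.1, ?_⟩
        intro k hk1 hk2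
        by_cases hkm : k ≤ mid - 1
        · exact this.2.2.2 k hk1 hkm
        · have : posB x mid ≤ posB x k := posB_le x mid k (by omega) (by omega)
          omega
    · simp only [h, dif_neg, not_false_iff]
      exact ⟨le_refl _, hlh, hbase, fun k hk1 hk2 => by omega⟩

theorem bLo_spec (tmin x : Int) : ∀ n : Nat, ∀ lo hi : Int, (hi - lo).toNat = n →
    lo ≤ hi → 0 ≤ lo → hi ≤ x → tmin ≤ posB x hi →
    lo ≤ bLo tmin x lo hi ∧ bLo tmin x lo hi ≤ hi ∧ tmin ≤ posB x (bLo tmin x lo hi) ∧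
      (∀ k, lo ≤ k → k < bLo tmin x lo hi → posB x k < tmin) := by
  intro n
  induction n using Nat.strong_induction_on with
  | _ n ih =>
    intro lo hi hn hlh h0 hhx hbase
    rw [bLo]
    by_cases h : lo < hi
    · have hb := PySem.Int.floordiv_two_mid_bounds (lo := lo) (hi := hi) (le_of_lt h)
      have hlt : PySem.Int.floordiv (lo + hi) 2 < hi :=
        (PySem.Int.floordiv_lt_iff_lt_mul (by omega)).2 (by omega)
      simp only [h, dif_pos]
      set mid := PySem.Int.floordiv (lo + hi) 2 with hmid
      by_cases hc : tmin ≤ posB x mid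
      · simp only [hc, if_pos]
        have := ih (mid - lo).toNat (by omega) lo mid rfl (by omega) h0 (by omega) hc
        exact ⟨this.1, by omega, this.2.2.1, this.2.2.2⟩
      · simp only [hc, if_neg, not_false_iff]
        have := ih (hi - (mid + 1)).toNat (by omega) (mid + 1) hi rfl (by omega) (by omega) hhx hbase
        refine ⟨by omega, this.2.1, this.2.2.1, ?_⟩
        intro k hk1 hk2
        by_cases hkm : k ≤ mid
        · have : posB x k ≤ posB x mid := posB_le x k mid hkm (by omega)
          omega
        · exact this.2.2.2 k (by omega) hk2
    · simp only [h, dif_neg, not_false_iff]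
      have : hi = lo := by omega
      exact ⟨le_refl _, hlh, by rw [this] at hbase; exact hbase, fun k hk1 hk2 => by omega⟩

theorem aLoop_spec (tmin tmax x : Int) : ∀ n : Nat, ∀ s : Int, ∀ acc : List (Int × Int),
    (x - s).toNat = n → 0 ≤ s → s ≤ x →
    ∃ K, s ≤ K ∧ K ≤ x ∧
      aLoop tmin tmax x s (posB x s) (x - s) acc
        = (K, x - K, acc ++ ((PySem.List.pyRange (s + 1) (x + 1) 1).filter
            (fun k => decide (tmin ≤ posB x k ∧ posB x k ≤ tmax))).map (fun k => (k, x))) ∧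
      (s < x → posB x (x - 1) < tmax → K = x) ∧
      (K = x → s = x ∨ posB x (x - 1) < tmax) := by
  intro n
  induction n using Nat.strong_induction_on with
  | _ n ih =>
    intro s acc hn h0 hsx
    rw [aLoop]
    by_cases h : posB x s < tmax ∧ 0 < x - s
    · simp only [h]
      have hps : posB x s + (x - s) = posB x (s + 1) := (posB_succ x s).symm
      have hv : x - s - 1 = x - (s + 1) := by ring
      rw [hps, hv]
      obtain ⟨K, hK1, hK2, heq, himp1, himp2⟩ :=
        ih (x - (s + 1)).toNat (by omega) (s + 1)
          (if tmin ≤ posB x (s + 1) ∧ posB x (s + 1) ≤ tmax then acc ++ [(s + 1, x)] else acc)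
          rfl (by omega) (by omega)
      refine ⟨K, by omega, hK2, ?_, ?_, ?_⟩
      · rw [heq]
        rw [PySem.List.pyRange_one_cons (show s + 1 < x + 1 by omega), List.filter_cons]
        by_cases hP : tmin ≤ posB x (s + 1) ∧ posB x (s + 1) ≤ tmax
        · simp [hP, List.append_assoc]
        · simp [hP]
      · intro _ hpos
        by_cases hsx1 : s + 1 < x
        · exact himp1 hsx1 hpos
        · omega
      · intro hKx
        rcases himp2 hKx with h1 | h2
        · right; have : s = x - 1 := by omega
          rw [← this]; exact h.1
        · right; exact h2
    · simp only [h, if_neg, not_false_iff]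
      refine ⟨s, le_refl _, hsx, ?_, ?_, ?_⟩
      · have hf : ((PySem.List.pyRange (s + 1) (x + 1) 1).filter
            (fun k => decide (tmin ≤ posB x k ∧ posB x k ≤ tmax))) = [] := by
          by_cases hsx' : s = x
          · rw [PySem.List.pyRange_one_eq_nil (by omega)]; rfl
          · have hstop : tmax ≤ posB x s := by
              by_contra hc; exact h ⟨by omega, by omega⟩
            apply filter_nil
            intro k hk1 hk2
            have := posB_lt x s k (by omega) (by omega)
            simp only [decide_eq_false_iff_not]
            rintro ⟨-, hB⟩
            linarith
        rw [hf]
        simp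
      · intro hlt hpos
        exfalso
        have hstop : tmax ≤ posB x s := by
          by_contra hc; exact h ⟨by omega, by omega⟩
        have := posB_le x s (x - 1) (by omega) (by omega)
        linarith
      · intro hKx; left; exact hKx

theorem filter_interval (P : Int → Bool) : ∀ n : Nat, ∀ a b lo hi : Int, (b - a).toNat = n →
    a ≤ lo → lo ≤ hi → hi < b →
    (∀ k, a ≤ k → k < b → (P k = true ↔ lo ≤ k ∧ k ≤ hi)) →
    (PySem.List.pyRange a b 1).filter P = PySem.List.pyRange lo (hi + 1) 1 := by
  intro n
  induction n using Nat.strong_induction_on with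
  | _ n ih =>
    intro a b lo hi hn hal hlh hhb hP
    have hab : a < b := by omega
    rw [PySem.List.pyRange_one_cons hab, List.filter_cons]
    by_cases ha : a = lo
    · have hPa : P a = true := (hP a (by omega) (by omega)).2 ⟨by omega, by omega⟩
      rw [hPa]
      simp only [if_pos]
      rw [PySem.List.pyRange_one_cons (show lo < hi + 1 by omega), ← ha]
      congr 1
      by_cases hah : a + 1 ≤ hi
      · exact ih (b - (a + 1)).toNat (by omega) (a + 1) b (a + 1) hi rfl (le_refl _) hah hhb
          (fun k hk1 hk2 => by rw [hP k (by omega) hk2]; omega)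
      · have hia : hi = a := by omega
        have hrhs : PySem.List.pyRange (a + 1) (hi + 1) = ([] : List Int) :=
          PySem.List.pyRange_one_eq_nil (by omega)
        rw [hrhs]
        apply filter_nil
        intro k hk1 hk2
        cases hPk : P k with
        | false => rfl
        | true => exact absurd ((hP k (by omega) hk2).1 hPk) (by omega)
    · have hPa : P a = false := by
        cases hPk : P a with
        | false => rfl
        | true => exact absurd ((hP a (by omega) (by omega)).1 hPk) (by omega)
      rw [hPa]
      simp only [Bool.false_eq_true, if_neg, not_false_iff]
      exact ih (b - (a + 1)).toNat (by omega) (a + 1) b lo hi rfl (by omega) hlh hhb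
        (fun k hk1 hk2 => hP k (by omega) hk2)

-- what one iteration of either loop appends for a given x
def outX (tmin tmax x : Int) : List (Int × Int) :=
  (if tmin ≤ posB x x then
    (PySem.List.pyRange (bLo tmin x 1 x) (bHi tmax x 0 x + 1) 1).map (fun k => (k, x))
  else []) ++
  (if posB x x ≤ tmax then (PySem.List.pyRange (x + 1) (x + 150) 1).map (fun k => (k, x))
   else [])

theorem bodyA_out (tmin tmax x : Int) (hx1 : 1 ≤ x) (hx2 : x ≤ tmax) (acc : List (Int × Int)) :
    (let r := aLoop tmin tmax x 0 0 x acc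
     if r.2.1 == 0 then
       r.2.2 ++ (PySem.List.pyRange (r.1 + 1) (r.1 + 150) 1).map (fun b => (b, x))
     else r.2.2)
    = acc ++ outX tmin tmax x := by
  have hcall : aLoop tmin tmax x 0 0 x acc = aLoop tmin tmax x 0 (posB x 0) (x - 0) acc := by
    rw [posB_zero]; norm_num
  obtain ⟨K, hK1, hK2, heq, himp1, himp2⟩ :=
    aLoop_spec tmin tmax x (x - 0).toNat 0 acc rfl (le_refl 0) (by omega)
  rw [hcall] at *
  have hHi := bHi_spec tmax x (x - 0).toNat 0 x rfl (by omega) (le_refl x)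
    (by rw [posB_zero]; omega)
  unfold outX
  set khi := bHi tmax x 0 x with hkhidef
  have hx1' : posB x (x - 1) + 1 = posB x x := by
    have := posB_succ x (x - 1)
    have e : x - 1 + 1 = x := by ring
    rw [e] at this
    omega
  have hreg_yes : tmin ≤ posB x x →
      ((PySem.List.pyRange (0 + 1) (x + 1) 1).filter
          (fun k => decide (tmin ≤ posB x k ∧ posB x k ≤ tmax)))
        = PySem.List.pyRange (bLo tmin x 1 x) (khi + 1) 1 := by
    intro htm
    have hLo := bLo_spec tmin x (x - 1).toNat 1 x rfl hx1 (by omega) (le_refl x) htm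
    set klo := bLo tmin x 1 x with hklodef
    by_cases hkk : klo ≤ khi
    · have h01 : (0 : Int) + 1 = 1 := by norm_num
      rw [h01]
      apply filter_interval _ (x + 1 - 1).toNat 1 (x + 1) klo khi rfl hLo.1 hkk (by omega)
      intro k hk1 hk2
      rw [decide_eq_true_iff]
      constructor
      · rintro ⟨hA, hB⟩
        constructor
        · by_contra hc
          have := hLo.2.2.2 k hk1 (by omega)
          linarith
        · by_contra hc
          have := hHi.2.2.2 k (by omega) (by omega)
          linarith
      · rintro ⟨h1, h2⟩
        constructor
        · have := posB_le x klo k h1 (by omega)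
          linarith [hLo.2.2.1]
        · have := posB_le x k khi h2 (by omega)
          linarith [hHi.2.2.1]
    · have hrhs : PySem.List.pyRange klo (khi + 1) 1 = ([] : List Int) :=
        PySem.List.pyRange_one_eq_nil (by omega)
      rw [hrhs]
      apply filter_nil
      intro k hk1 hk2
      rw [decide_eq_false_iff_not]
      rintro ⟨hA, hB⟩
      by_cases hkl : k < klo
      · have := hLo.2.2.2 k (by omega) hkl
        linarith
      · have := hHi.2.2.2 k (by omega) (by omega)
        linarith
  have hreg_no : ¬ tmin ≤ posB x x →
      ((PySem.List.pyRange (0 + 1) (x + 1) 1).filter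
          (fun k => decide (tmin ≤ posB x k ∧ posB x k ≤ tmax))) = [] := by
    intro htm
    apply filter_nil
    intro k hk1 hk2
    rw [decide_eq_false_iff_not]
    rintro ⟨hA, hB⟩
    have := posB_le x k x (by omega) (le_refl x)
    linarith
  by_cases hpk : posB x x ≤ tmax
  · have hKx : K = x := himp1 (by omega) (by omega)
    simp only [heq, hKx, hpk, if_pos, sub_self]
    by_cases htm : tmin ≤ posB x x
    · rw [hreg_yes htm]
      simp [htm, List.append_assoc]
    · rw [hreg_no htm]
      simp [htm]
  · have hKx : K ≠ x := by
      intro hc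
      rcases himp2 hc with h1 | h2 <;> omega
    simp only [heq]
    have hbeq : (x - K == 0) = false := by
      simp only [beq_eq_false_iff_ne, ne_eq]
      omega
    simp only [hbeq, Bool.false_eq_true, if_neg, not_false_iff, hpk]
    by_cases htm : tmin ≤ posB x x
    · rw [hreg_yes htm]
      simp [htm]
    · rw [hreg_no htm]
      simp [htm]

-- the amortized pointer loops land exactly on the reference values
theorem whileHi_eq (tmax x : Int) (hx1 : 1 ≤ x) (hx2 : x ≤ tmax) :
    ∀ n : Nat, ∀ kh : Int, (kh - bHi tmax x 0 x).toNat = n →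
    bHi tmax x 0 x ≤ kh → kh ≤ x →
    whileHi (2 * tmax) (2 * x + 1) kh = bHi tmax x 0 x := by
  have hHi := bHi_spec tmax x (x - 0).toNat 0 x rfl (by omega) (le_refl x)
    (by rw [posB_zero]; omega)
  intro n
  induction n using Nat.strong_induction_on with
  | _ n ih =>
    intro kh hn h1 h2
    have hdub : kh * (2 * x + 1 - kh) = 2 * posB x kh := by
      rw [posB_double]; ring
    rw [whileHi]
    by_cases hc : kh * (2 * x + 1 - kh) > 2 * tmax
    · have hgt : tmax < posB x kh := by linarith
      have hne : kh ≠ bHi tmax x 0 x := by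
        intro hkk
        rw [hkk] at hgt
        linarith [hHi.2.2.1]
      simp only [hc, if_pos]
      exact ih (kh - 1 - bHi tmax x 0 x).toNat (by omega) (kh - 1) rfl (by omega) (by omega)
    · simp only [hc, if_neg, not_false_iff]
      have hle : posB x kh ≤ tmax := by linarith [not_lt.mp (by simpa using hc)]
      by_contra hne
      have hlt : bHi tmax x 0 x < kh := by omega
      have := hHi.2.2.2 kh hlt h2
      linarith

theorem whileLo_eq (tmin x : Int) (hx1 : 1 ≤ x) (hpk : tmin ≤ posB x x) :
    ∀ n : Nat, ∀ kl : Int, (kl - bLo tmin x 1 x).toNat = n →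
    bLo tmin x 1 x ≤ kl → kl ≤ x →
    whileLo (2 * tmin) (2 * x + 1) kl = bLo tmin x 1 x := by
  have hLo := bLo_spec tmin x (x - 1).toNat 1 x rfl hx1 (by omega) (le_refl x) hpk
  intro n
  induction n using Nat.strong_induction_on with
  | _ n ih =>
    intro kl hn h1 h2
    have hdub : (kl - 1) * (2 * x + 1 - (kl - 1)) = 2 * posB x (kl - 1) := by
      rw [posB_double]; ring
    rw [whileLo]
    by_cases hc : 1 < kl ∧ 2 * tmin ≤ (kl - 1) * (2 * x + 1 - (kl - 1))
    · have hge : tmin ≤ posB x (kl - 1) := by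
        rw [hdub] at hc
        linarith [hc.2]
      have hkl1 : bLo tmin x 1 x ≤ kl - 1 := by
        by_contra hcc
        have := hLo.2.2.2 (kl - 1) (by omega) (by omega)
        linarith
      simp only [hc]
      exact ih (kl - 1 - bLo tmin x 1 x).toNat (by omega) (kl - 1) rfl hkl1 (by omega)
    · simp only [hc, if_neg, not_false_iff]
      rcases not_and_or.mp hc with h3 | h3
      · -- kl = 1
        have : kl = 1 := by omega
        omega
      · -- posB x (kl-1) < tmin, so bLo can't be ≤ kl - 1
        rw [hdub] at h3
        have hlt : posB x (kl - 1) < tmin := by linarith [not_le.mp h3]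
        by_contra hne
        have hbl : bLo tmin x 1 x ≤ kl - 1 := by omega
        have := posB_le x (bLo tmin x 1 x) (kl - 1) hbl (by omega)
        linarith [hLo.2.2.1]

-- invariants carried by B's two pointers from one x to the next
def InvHi (tmax x0 kh : Int) : Prop :=
  0 ≤ kh ∧ kh ≤ x0 - 1 ∧ ∀ k, kh < k → k ≤ x0 - 1 → tmax < posB (x0 - 1) k

def InvLo (tmin x0 kl : Int) : Prop :=
  kl = 0 ∨ (1 ≤ kl ∧ kl ≤ x0 - 1 ∧ tmin ≤ posB (x0 - 1) kl ∧
    ∀ k, 1 ≤ k → k < kl → posB (x0 - 1) k < tmin)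

theorem fold_eq (tmin tmax : Int) : ∀ n : Nat, ∀ x0 kh kl : Int, ∀ acc : List (Int × Int),
    (tmax + 1 - x0).toNat = n → 1 ≤ x0 → x0 ≤ tmax + 1 →
    InvHi tmax x0 kh → InvLo tmin x0 kl →
    ((PySem.List.pyRange x0 (tmax + 1) 1).foldl
      (fun (st : List (Int × Int) × Int × Int) x =>
        let w := 2 * x + 1
        let peak2 := x * (x + 1)
        let k_hi := if peak2 ≤ 2 * tmax then x else whileHi (2 * tmax) w st.2.1
        let st1 : List (Int × Int) × Int × Int :=
          if 2 * tmin ≤ peak2 then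
            let k_lo := whileLo (2 * tmin) w (if st.2.2 == 0 then x else st.2.2)
            (st.1 ++ (PySem.List.pyRange k_lo (k_hi + 1) 1).map (fun k => (k, x)), k_hi, k_lo)
          else (st.1, k_hi, st.2.2)
        if peak2 ≤ 2 * tmax then
          (st1.1 ++ (PySem.List.pyRange (x + 1) (x + 150) 1).map (fun k => (k, x)), st1.2)
        else st1)
      (acc, kh, kl)).1
    = (PySem.List.pyRange x0 (tmax + 1) 1).foldl
        (fun possible x =>
          let r := aLoop tmin tmax x 0 0 x possible
          if r.2.1 == 0 then
            r.2.2 ++ (PySem.List.pyRange (r.1 + 1) (r.1 + 150) 1).map (fun b => (b, x))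
          else r.2.2) acc := by
  intro n
  induction n using Nat.strong_induction_on with
  | _ n ih =>
    intro x0 kh kl acc hn hx1 hx2 hInvHi hInvLo
    by_cases hend : tmax + 1 ≤ x0
    · rw [PySem.List.pyRange_one_eq_nil hend]
      rfl
    · have hx0t : x0 ≤ tmax := by omega
      rw [PySem.List.pyRange_one_cons (by omega : x0 < tmax + 1)]
      simp only [List.foldl_cons]
      -- identify the doubled comparisons with posB comparisons
      have hpk2 : x0 * (x0 + 1) = 2 * posB x0 x0 := by
        rw [posB_double]; ring
      have hHi := bHi_spec tmax x0 (x0 - 0).toNat 0 x0 rfl (by omega) (le_refl x0)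
        (by rw [posB_zero]; omega)
      -- the computed k_hi equals the reference bHi value
      have hkhi : (if x0 * (x0 + 1) ≤ 2 * tmax then x0 else whileHi (2 * tmax) (2 * x0 + 1) kh)
          = bHi tmax x0 0 x0 := by
        by_cases hp : posB x0 x0 ≤ tmax
        · have : x0 * (x0 + 1) ≤ 2 * tmax := by omega
          rw [if_pos this]
          -- bHi = x0 by maximality
          by_contra hne
          have hlt : bHi tmax x0 0 x0 < x0 := by
            rcases lt_or_eq_of_le hHi.2.1 with h | h
            · exact h
            · exact absurd h.symm hne
          have := hHi.2.2.2 x0 hlt (le_refl x0)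
          linarith
        · have hgt : ¬ x0 * (x0 + 1) ≤ 2 * tmax := by omega
          rw [if_neg hgt]
          apply whileHi_eq tmax x0 hx1 hx0t (kh - bHi tmax x0 0 x0).toNat kh rfl ?_ (by
            rcases hInvHi with ⟨h1, h2, h3⟩; omega)
          -- bHi tmax x0 0 x0 ≤ kh
          obtain ⟨hI1, hI2, hI3⟩ := hInvHi
          by_contra hcc
          rw [not_le] at hcc
          have hb1 : bHi tmax x0 0 x0 ≤ x0 - 1 := by
            rcases lt_or_eq_of_le hHi.2.1 with h | h
            · omega
            · exfalso; rw [h] at hHi; exact hp hHi.2.2.1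
          have := hI3 (bHi tmax x0 0 x0) hcc hb1
          have hstep := posB_xstep x0 (bHi tmax x0 0 x0)
          have := hHi.2.2.1
          -- posB (x0-1) b ≤ posB x0 b (b ≥ 0), but tmax < posB (x0-1) b and posB x0 b ≤ tmax
          omega
      rw [hkhi]
      set khi := bHi tmax x0 0 x0 with hkhidef
      by_cases htm : tmin ≤ posB x0 x0
      · -- the k_lo branch is active
        have htm2 : 2 * tmin ≤ x0 * (x0 + 1) := by omega
        have hLo := bLo_spec tmin x0 (x0 - 1).toNat 1 x0 rfl hx1 (by omega) (le_refl x0) htm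
        have hklo : whileLo (2 * tmin) (2 * x0 + 1) (if kl == 0 then x0 else kl)
            = bLo tmin x0 1 x0 := by
          by_cases hkl0 : kl = 0
          · simp only [hkl0, beq_self_eq_true, if_pos]
            exact whileLo_eq tmin x0 hx1 htm (x0 - bLo tmin x0 1 x0).toNat x0 rfl
              hLo.2.1 (le_refl x0)
          · have hb : (kl == 0) = false := by simp [hkl0]
            simp only [hb, Bool.false_eq_true, if_neg, not_false_iff]
            rcases hInvLo with h | ⟨hI1, hI2, hI3, hI4⟩
            · exact absurd h hkl0
            · have hstep := posB_xstep x0 kl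
              have hklpos : tmin ≤ posB x0 kl := by omega
              have hble : bLo tmin x0 1 x0 ≤ kl := by
                by_contra hcc
                have := hLo.2.2.2 kl (by omega) (by omega)
                linarith
              exact whileLo_eq tmin x0 hx1 htm (kl - bLo tmin x0 1 x0).toNat kl rfl
                hble (by omega)
        rw [if_pos htm2, hklo]
        set klo := bLo tmin x0 1 x0 with hklodef
        -- next-step invariants
        have hInvHi' : InvHi tmax (x0 + 1) khi := by
          refine ⟨hHi.1, by omega, ?_⟩
          intro k hk1 hk2
          simp only [add_sub_cancel_right] at hk2 ⊢
          exact hHi.2.2.2 k hk1 (by omega)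
        have hInvLo' : InvLo tmin (x0 + 1) klo := by
          right
          refine ⟨hLo.1, by simpa using hLo.2.1, ?_, ?_⟩
          · simpa using hLo.2.2.1
          · intro k hk1 hk2
            simpa using hLo.2.2.2 k hk1 hk2
        by_cases hpk : posB x0 x0 ≤ tmax
        · have hpk2' : x0 * (x0 + 1) ≤ 2 * tmax := by omega
          simp only [hpk2', if_pos]
          rw [ih (tmax + 1 - (x0 + 1)).toNat (by omega) (x0 + 1) khi klo _ rfl (by omega)
            (by omega) hInvHi' hInvLo']
          congr 1
          rw [bodyA_out tmin tmax x0 hx1 hx0t acc]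
          unfold outX
          rw [← hkhidef, ← hklodef]
          simp [htm, hpk, List.append_assoc]
        · have hpk2' : ¬ x0 * (x0 + 1) ≤ 2 * tmax := by omega
          simp only [hpk2', if_neg, not_false_iff]
          rw [ih (tmax + 1 - (x0 + 1)).toNat (by omega) (x0 + 1) khi klo _ rfl (by omega)
            (by omega) hInvHi' hInvLo']
          congr 1
          rw [bodyA_out tmin tmax x0 hx1 hx0t acc]
          unfold outX
          rw [← hkhidef, ← hklodef]
          simp [htm, hpk]
      · -- k_lo branch inactive
        have htm2 : ¬ 2 * tmin ≤ x0 * (x0 + 1) := by omega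
        rw [if_neg htm2]
        have hkl0 : kl = 0 := by
          rcases hInvLo with h | ⟨hI1, hI2, hI3, hI4⟩
          · exact h
          · exfalso
            have hstep := posB_xstep x0 kl
            have : posB x0 kl ≤ posB x0 x0 := posB_le x0 kl x0 (by omega) (le_refl x0)
            omega
        have hInvHi' : InvHi tmax (x0 + 1) khi := by
          refine ⟨hHi.1, by omega, ?_⟩
          intro k hk1 hk2
          simp only [add_sub_cancel_right]
          exact hHi.2.2.2 k hk1 (by omega)
        have hInvLo' : InvLo tmin (x0 + 1) kl := Or.inl hkl0
        by_cases hpk : posB x0 x0 ≤ tmax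
        · have hpk2' : x0 * (x0 + 1) ≤ 2 * tmax := by omega
          simp only [hpk2', if_pos]
          rw [ih (tmax + 1 - (x0 + 1)).toNat (by omega) (x0 + 1) khi kl _ rfl (by omega)
            (by omega) hInvHi' hInvLo']
          congr 1
          rw [bodyA_out tmin tmax x0 hx1 hx0t acc]
          unfold outX
          simp [htm, hpk]
        · have hpk2' : ¬ x0 * (x0 + 1) ≤ 2 * tmax := by omega
          simp only [hpk2', if_neg, not_false_iff]
          rw [ih (tmax + 1 - (x0 + 1)).toNat (by omega) (x0 + 1) khi kl _ rfl (by omega)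
            (by omega) hInvHi' hInvLo']
          congr 1
          rw [bodyA_out tmin tmax x0 hx1 hx0t acc]
          unfold outX
          simp [htm, hpk]

-- ===== VERDICT (by name: the statement is the Claim_ definition above) =====
theorem determine_steps_spec : Claim_equal_determine_steps := by
  intro tmin tmax _
  unfold Spec_determine_steps determine_steps determine_steps_alt
  by_cases h : 1 ≤ tmax
  · rw [← fold_eq tmin tmax (tmax + 1 - 1).toNat 1 0 0 [] rfl (le_refl 1) (by omega)
      ⟨le_refl 0, by omega, fun k hk1 hk2 => by omega⟩ (Or.inl rfl)]
  · rw [PySem.List.pyRange_one_eq_nil (by omega : tmax + 1 ≤ 1)]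
    rfl
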